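-- pv_equiv track=rewrite | github.com/Revi1337/BaekJoon-Coding-Test | 백준/Silver/13417. 카드 문자열/카드 문자열.py | solution
-- ===== SOURCE A (Python) =====
-- from collections import deque
--
-- def solution(N, cards):
--     cards = deque(list(cards))
--     answer = deque([cards.popleft()])
--     front = answer[0]
--     while cards:
--         if cards[0] > front:
--             answer.append(cards.popleft())
--         else:
--             curr = cards.popleft()
--             answer.appendleft(curr)
--             front = curr
--
--     return "".join(answer)
-- ===== SOURCE B (Python) =====
-- def solution(N, cards):
--     # Pass 1: prefix minima (A's mutable 'front' is exactly the running minimum).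
--     mins = [cards[0]]
--     for c in cards[1:]:
--         mins.append(min(mins[-1], c))
--     # Pass 2: classify each later card against the minimum of the cards before it.
--     pairs = list(zip(cards[1:], mins))
--     left = [c for c, m in pairs if c <= m]
--     right = [c for c, m in pairs if c > m]
--     return "".join(reversed(left)) + cards[0] + "".join(right)
-- ===== Notes on version B (the rewrite author's own statement) =====
-- stated objective: alternative
-- what changed: Replaces the deque's stateful front-pointer loop by the observation that A's 'front' is the running minimum: B precomputes prefix minima in one pass, then builds the left and right halves by two independent filters against them.
import Mathlib
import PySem

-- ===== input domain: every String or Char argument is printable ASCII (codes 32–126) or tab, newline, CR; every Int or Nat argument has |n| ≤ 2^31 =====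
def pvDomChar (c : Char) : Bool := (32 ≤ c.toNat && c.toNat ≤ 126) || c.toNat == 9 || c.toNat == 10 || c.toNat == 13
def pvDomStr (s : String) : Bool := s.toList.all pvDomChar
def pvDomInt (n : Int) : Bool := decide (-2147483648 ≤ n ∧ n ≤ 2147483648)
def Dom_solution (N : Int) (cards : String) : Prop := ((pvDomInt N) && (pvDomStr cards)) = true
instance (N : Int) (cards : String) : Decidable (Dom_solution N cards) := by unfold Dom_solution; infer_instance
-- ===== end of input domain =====

-- B drops the deque/front loop: it precomputes prefix minima, then filters later cards into the two halves (alternative decomposition; same cost).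

-- ===== PORT A =====
-- The deque 'answer' is a List Char; appendleft = cons, append = ++ [c]; 'front' is the state A carries.
def solutionLoopA (cs : List Char) (answer : List Char) (front : Char) : List Char :=
  match cs with
  | [] => answer
  | c :: rest =>
    if front < c then solutionLoopA rest (answer ++ [c]) front
    else solutionLoopA rest (c :: answer) c

def solution (N : Int) (cards : String) : String :=
  match cards.toList with
  | [] => ""   -- Python raises IndexError here; excluded by Pre_solution
  | c :: rest => String.mk (solutionLoopA rest [c] c)

-- ===== PORT B =====
-- mins.append(min(mins[-1], c)) loop from Source B, carrying mins[-1] as the argument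
def minsB (m : Char) (cs : List Char) : List Char :=
  match cs with
  | [] => []
  | c :: rest => min m c :: minsB (min m c) rest

def solution_alt (N : Int) (cards : String) : String :=
  match cards.toList with
  | [] => ""   -- cards[0] raises IndexError here; excluded by Pre_solution
  | c0 :: rest =>
    let mins := c0 :: minsB c0 rest
    let pairs := rest.zip mins
    let left := (pairs.filter (fun p => p.1 ≤ p.2)).map Prod.fst
    let right := (pairs.filter (fun p => p.2 < p.1)).map Prod.fst
    String.mk (left.reverse ++ c0 :: right)

-- ===== PRECONDITION & SPEC =====
-- A (and B) raise IndexError on the empty string; Pre_ excludes exactly that input.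
def Pre_solution (N : Int) (cards : String) : Prop := cards ≠ ""
instance (N : Int) (cards : String) : Decidable (Pre_solution N cards) := by unfold Pre_solution; infer_instance
def pvWitness_solution : Int × String := (3, "abc")

def Spec_solution (N : Int) (cards : String) (out : String) : Prop := out = solution_alt N cards
instance (N : Int) (cards : String) (out : String) : Decidable (Spec_solution N cards out) := by unfold Spec_solution; infer_instance

-- ===== CLAIM =====
def Claim_equal_solution : Prop := ∀ (N : Int) (cards : String), Dom_solution N cards → Pre_solution N cards → Spec_solution N cards (solution N cards)

-- ===== LEMMAS AND PROOFS =====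
-- Each later card paired with the minimum of the cards strictly before it
def chainAux (front : Char) (cs : List Char) : List (Char × Char) :=
  match cs with
  | [] => []
  | c :: rest => (c, front) :: chainAux (min front c) rest

lemma zip_mins_eq_chain (cs : List Char) : ∀ (f : Char),
    cs.zip (f :: minsB f cs) = chainAux f cs := by
  induction cs with
  | nil => intro f; rfl
  | cons c rest ih =>
    intro f
    simp only [minsB, List.zip_cons_cons, chainAux]
    exact congrArg _ (ih (min f c))

lemma loopA_eq_chain (cs : List Char) : ∀ (front : Char) (answer : List Char),
    solutionLoopA cs answer front =
      (((chainAux front cs).filter (fun p => p.1 ≤ p.2)).map Prod.fst).reverse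
        ++ answer
        ++ ((chainAux front cs).filter (fun p => p.2 < p.1)).map Prod.fst := by
  induction cs with
  | nil => intro front answer; simp [solutionLoopA, chainAux]
  | cons c rest ih =>
    intro front answer
    simp only [solutionLoopA, chainAux]
    by_cases h : front < c
    · have hmin : min front c = front := min_eq_left (le_of_lt h)
      rw [if_pos h, ih front (answer ++ [c]), hmin]
      simp [not_le.mpr h, h, List.append_assoc]
    · have hle : c ≤ front := not_lt.mp h
      have hmin : min front c = c := min_eq_right hle
      rw [if_neg h, ih c (c :: answer), hmin]
      simp [hle, not_lt.mpr hle, List.append_assoc]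

-- ===== VERDICT =====
theorem solution_spec : Claim_equal_solution := by
  intro N cards _ hpre
  unfold Spec_solution solution solution_alt
  cases hcl : cards.toList with
  | nil =>
    exact absurd (String.toList_inj.mp (by simpa using hcl)) hpre
  | cons c rest =>
    simp only [zip_mins_eq_chain]
    exact congrArg String.mk (by simpa using loopA_eq_chain rest c [c])
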